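-- pv_equiv track=rewrite | github.com/JoonHyeok-hozy-Kim/algorithm_study | BaekJoon/Solutions/Week6/MainQuestions/Sol_10_221109_1802.py | reset_type_one
-- ===== SOURCE A (Python) =====
-- def reset_type_one(curr):
--     idx = 0
--     result = []
--     cnt = 0
--     while idx < len(curr):
--         if (cnt % 2 == 0 and curr[idx] == '1') or (cnt % 2 == 1 and curr[idx] == '0'):
--             if idx == len(curr) -1:
--                 break
--             else:
--                 idx += 1
--                 cnt += 1
--         else:
--             return False, None
--
--         if idx == len(curr):
--             return False, None
--         else:
--             result.append(curr[idx])
--             idx += 1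
--
--     return True, ''.join(result)
-- ===== SOURCE B (Python) =====
-- def reset_type_one(curr):
--     # Split into the two interleaved subsequences, then compare the even-index
--     # one against the expected alternating '1','0',... pattern.
--     pattern = curr[0::2]
--     extract = curr[1::2]
--     expected = ''.join('1' if i % 2 == 0 else '0' for i in range(len(pattern)))
--     if pattern == expected:
--         return True, extract
--     return False, None
-- ===== Notes on version B (the rewrite author's own statement) =====
-- stated objective: simpler
-- what changed: Replaces A's interleaved index/cnt while-loop with early returns and a break by a split-into-two-subsequences strategy: the even-index characters are compared wholesale against the expected alternating '1','0',... string and the odd-index characters are returned as the extract.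
import Mathlib
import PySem

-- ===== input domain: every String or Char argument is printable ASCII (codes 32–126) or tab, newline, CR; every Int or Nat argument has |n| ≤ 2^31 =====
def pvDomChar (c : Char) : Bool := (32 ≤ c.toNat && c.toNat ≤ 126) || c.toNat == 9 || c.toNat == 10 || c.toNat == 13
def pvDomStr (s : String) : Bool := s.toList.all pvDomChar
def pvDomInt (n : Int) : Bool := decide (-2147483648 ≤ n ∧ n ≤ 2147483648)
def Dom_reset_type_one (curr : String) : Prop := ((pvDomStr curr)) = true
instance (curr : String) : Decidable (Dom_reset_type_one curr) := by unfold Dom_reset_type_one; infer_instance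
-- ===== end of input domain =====

-- B replaces A's interleaved while-loop by slicing the string into its even- and
-- odd-index subsequences and comparing the former against the expected alternating
-- pattern (objective: simpler; same O(n) cost).

-- ===== PORT A =====
-- A's while-loop over idx/cnt/result: each iteration reads curr[idx]; 'idx == len(curr)-1'
-- is 'rest = []' after the current char; 'idx += 1; ... result.append(curr[idx]); idx += 1'
-- consumes the next char d into the accumulator.  The unreachable 'if idx == len(curr)'
-- branch (idx < len-1 held just before) has no counterpart.  ''.join(result) = String.ofList.
def resetLoopA : List Char → Int → List Char → Bool × Option String
  | [], _, result => (true, some (String.ofList result))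
  | c :: rest, cnt, result =>
    if (PySem.Int.mod cnt 2 == 0 && c == '1') || (PySem.Int.mod cnt 2 == 1 && c == '0') then
      match rest with
      | [] => (true, some (String.ofList result))              -- break
      | d :: rest' => resetLoopA rest' (cnt + 1) (result ++ [d])
    else (false, none)

def reset_type_one (curr : String) : Bool × Option String :=
  resetLoopA curr.toList 0 []

-- ===== PORT B =====
-- pattern = curr[0::2]; extract = curr[1::2]  (step-2 slices; step ≠ 0, so slice? is
-- always 'some' — '.getD ""' only discharges the Option).
-- expected = ''.join('1' if i % 2 == 0 else '0' for i in range(len(pattern))).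
def reset_type_one_alt (curr : String) : Bool × Option String :=
  let pattern : String := (PySem.Str.slice? curr (some 0) none 2).getD ""
  let extract : String := (PySem.Str.slice? curr (some 1) none 2).getD ""
  let expected : String := String.ofList ((PySem.List.pyRange 0 (pattern.length : Int) 1).map
    (fun i => if PySem.Int.mod i 2 == 0 then '1' else '0'))
  if pattern == expected then (true, some extract) else (false, none)

-- ===== PRECONDITION & SPEC =====
def Spec_reset_type_one (curr : String) (out : Bool × Option String) : Prop := out = reset_type_one_alt curr
instance (curr : String) (out : Bool × Option String) : Decidable (Spec_reset_type_one curr out) := by unfold Spec_reset_type_one; infer_instance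

-- ===== CLAIM (what is proved, stated in full; the proofs are below) =====
def Claim_equal_reset_type_one : Prop := ∀ (curr : String), Dom_reset_type_one curr → Spec_reset_type_one curr (reset_type_one curr)

-- ===== LEMMAS AND PROOFS =====

-- every second element, starting with the first
def everyOther : List Char → List Char
  | [] => []
  | [c] => [c]
  | c :: _ :: rest => c :: everyOther rest

-- the expected alternating pattern, starting with '1' when p = true
def expList : Bool → Nat → List Char
  | _, 0 => []
  | p, n + 1 => (if p then '1' else '0') :: expList (!p) n

theorem everyOther_length : ∀ l : List Char, (everyOther l).length = (l.length + 1) / 2 := by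
  intro l
  induction l using everyOther.induct with
  | case1 => simp [everyOther]
  | case2 c => simp [everyOther]
  | case3 c d rest ih => simp [everyOther, ih]; omega

theorem fm_even : ∀ xs : List Char,
    List.filterMap (fun k => xs[2 * k]?) (List.range ((xs.length + 1) / 2)) = everyOther xs := by
  intro xs
  induction xs using everyOther.induct with
  | case1 => simp [everyOther]
  | case2 c => simp [everyOther, List.range_succ]
  | case3 c d rest ih =>
    have hc : (c :: d :: rest).length + 1 = 2 * 1 + (rest.length + 1) := by simp; omega
    have hn : ((c :: d :: rest).length + 1) / 2 = (rest.length + 1) / 2 + 1 := by omega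
    rw [hn, List.range_succ_eq_map, List.filterMap_cons, List.filterMap_map]
    simp only [Nat.mul_zero, Function.comp]
    have : ∀ k : Nat, (c :: d :: rest)[2 * (k + 1)]? = rest[2 * k]? := by
      intro k
      have : 2 * (k + 1) = 2 * k + 1 + 1 := by omega
      rw [this]; simp
    simp only [this, ih]
    simp [everyOther]

theorem fm_odd : ∀ xs : List Char,
    List.filterMap (fun k => xs[2 * k + 1]?) (List.range (xs.length / 2)) = everyOther xs.tail := by
  intro xs
  induction xs using everyOther.induct with
  | case1 => simp [everyOther]
  | case2 c => simp [everyOther]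
  | case3 c d rest ih =>
    have hn : (c :: d :: rest).length / 2 = rest.length / 2 + 1 := by simp; omega
    rw [hn, List.range_succ_eq_map, List.filterMap_cons, List.filterMap_map]
    simp only [Nat.mul_zero, Function.comp]
    have : ∀ k : Nat, (c :: d :: rest)[2 * (k + 1) + 1]? = rest[2 * k + 1]? := by
      intro k
      have : 2 * (k + 1) + 1 = 2 * k + 1 + 1 + 1 := by omega
      rw [this]; simp
    simp only [this, ih]
    cases rest <;> simp [everyOther]

theorem slice?_zero_two (xs : List Char) :
    PySem.List.slice? xs (some 0) none 2 = some (everyOther xs) := by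
  unfold PySem.List.slice? PySem.List.sliceIndices
  norm_num
  have h1 : ∀ k : Nat, ((2 * (k : Int)).toNat) = 2 * k := by intro k; omega
  have h2 : (if 0 < xs.length then (((xs.length : Int) + 2 - 1) / 2).toNat else 0) = (xs.length + 1) / 2 := by
    split_ifs with h <;> omega
  simp only [h1, h2, fm_even]

theorem slice?_one_two (xs : List Char) :
    PySem.List.slice? xs (some 1) none 2 = some (everyOther xs.tail) := by
  unfold PySem.List.slice? PySem.List.sliceIndices
  norm_num
  cases xs with
  | nil => simp [everyOther]
  | cons c rest =>
    have hmin : min (1:Int) ((c :: rest).length : Int) = 1 := by simp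
    rw [hmin]
    have h1 : ∀ k : Nat, (((1:Int) + 2 * (k : Int)).toNat) = 2 * k + 1 := by intro k; omega
    have h2 : (if 1 < (c :: rest).length then ((((c :: rest).length : Int) - 1 + 2 - 1) / 2).toNat else 0)
        = (c :: rest).length / 2 := by
      split_ifs with h
      · simp only [List.length_cons] at h ⊢; push_cast; omega
      · simp only [List.length_cons] at h ⊢; omega
    simp only [h1, h2, fm_odd]

theorem mod2_cases (cnt : Int) : PySem.Int.mod cnt 2 = 0 ∨ PySem.Int.mod cnt 2 = 1 := by
  rw [PySem.Int.mod_eq_emod_of_pos (by omega)]; omega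

theorem mod2_flip (cnt : Int) : (PySem.Int.mod (cnt + 1) 2 == 0) = !(PySem.Int.mod cnt 2 == 0) := by
  rw [PySem.Int.mod_eq_emod_of_pos (a := cnt + 1) (by omega),
    PySem.Int.mod_eq_emod_of_pos (a := cnt) (by omega)]
  rcases Int.emod_two_eq cnt with h | h
  · have h2 : (cnt + 1) % 2 = 1 := by omega
    rw [h, h2]; rfl
  · have h2 : (cnt + 1) % 2 = 0 := by omega
    rw [h, h2]; rfl

theorem guard_eq (cnt : Int) (c : Char) :
    ((PySem.Int.mod cnt 2 == 0 && c == '1') || (PySem.Int.mod cnt 2 == 1 && c == '0'))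
      = (c == (if PySem.Int.mod cnt 2 == 0 then '1' else '0')) := by
  rcases mod2_cases cnt with h | h <;> rw [h] <;> simp

theorem everyOther_cons (x : Char) (xs : List Char) :
    everyOther (x :: xs) = x :: everyOther xs.tail := by
  cases xs <;> simp [everyOther]

theorem expList_eq (n : Nat) : ∀ a : Int,
    (PySem.List.pyRange a (a + n) 1).map (fun i => if PySem.Int.mod i 2 == 0 then '1' else '0')
      = expList (PySem.Int.mod a 2 == 0) n := by
  induction n with
  | zero => intro a; rw [show a + (0:Nat) = a by omega, PySem.List.pyRange_one_eq_nil le_rfl]; rfl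
  | succ n ih =>
    intro a
    rw [PySem.List.pyRange_one_cons (by omega), List.map_cons,
      show a + ((n + 1 : Nat) : Int) = (a + 1) + ((n : Nat) : Int) by push_cast; omega, ih (a + 1),
      mod2_flip a]
    simp only [expList]

theorem resetLoopA_eq : ∀ (l : List Char) (cnt : Int) (result : List Char),
    resetLoopA l cnt result =
      if everyOther l = expList (PySem.Int.mod cnt 2 == 0) ((l.length + 1) / 2)
      then (true, some (String.ofList (result ++ everyOther l.tail)))
      else (false, none) := by
  intro l
  induction l using everyOther.induct with
  | case1 => intro cnt result; simp [resetLoopA, everyOther, expList]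
  | case2 c =>
    intro cnt result
    rw [show (([c] : List Char).length + 1) / 2 = 1 by simp]
    simp only [resetLoopA, guard_eq, everyOther, expList, List.tail_cons]
    cases hb : (c == (if PySem.Int.mod cnt 2 == 0 then '1' else '0')) with
    | true =>
      have hc : c = (if PySem.Int.mod cnt 2 == 0 then '1' else '0') := eq_of_beq hb
      subst hc
      rw [if_pos rfl, if_pos rfl]
      simp
    | false =>
      rw [if_neg (by simp), if_neg (by
        simp only [List.cons.injEq]; intro h
        have ht : (c == (if PySem.Int.mod cnt 2 == 0 then '1' else '0')) = true :=
          beq_iff_eq.mpr h.1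
        rw [ht] at hb; exact Bool.noConfusion hb)]
  | case3 c d rest ih =>
    intro cnt result
    rw [show ((c :: d :: rest).length + 1) / 2 = (rest.length + 1) / 2 + 1 by simp; omega]
    simp only [resetLoopA, guard_eq, List.tail_cons, expList, everyOther_cons, List.tail_cons]
    cases hb : (c == (if PySem.Int.mod cnt 2 == 0 then '1' else '0')) with
    | true =>
      have hc : c = (if PySem.Int.mod cnt 2 == 0 then '1' else '0') := eq_of_beq hb
      subst hc
      rw [if_pos rfl, ih (cnt + 1) (result ++ [d]), mod2_flip]
      by_cases hr : everyOther rest = expList (!(PySem.Int.mod cnt 2 == 0)) ((rest.length + 1) / 2)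
      · rw [if_pos hr, if_pos (by rw [hr])]
        simp
      · rw [if_neg hr, if_neg (by simp only [List.cons.injEq]; intro h; exact hr h.2)]
    | false =>
      rw [if_neg (by simp), if_neg (by
        simp only [List.cons.injEq]; intro h
        have ht : (c == (if PySem.Int.mod cnt 2 == 0 then '1' else '0')) = true :=
          beq_iff_eq.mpr h.1
        rw [ht] at hb; exact Bool.noConfusion hb)]

-- ===== VERDICT (by name: the statement is the Claim_ definition above) =====
theorem reset_type_one_spec : Claim_equal_reset_type_one := by
  intro curr _
  unfold Spec_reset_type_one reset_type_one reset_type_one_alt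
  rw [resetLoopA_eq]
  simp only [PySem.Str.slice?, PySem.Chars.slice?_eq_listSlice?, slice?_zero_two, slice?_one_two,
    Option.map_some, Option.getD_some, List.nil_append]
  have hm0 : (PySem.Int.mod 0 2 == 0) = true := by
    rw [PySem.Int.mod_eq_emod_of_pos (by omega)]; rfl
  have hlen : (String.ofList (everyOther curr.toList)).length = (curr.toList.length + 1) / 2 := by
    simp [everyOther_length]
  have he : ∀ n : Nat,
      List.map (fun i => if PySem.Int.mod i 2 == 0 then '1' else '0')
        (PySem.List.pyRange 0 (n : Int) 1) = expList true n := by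
    intro n
    have h := expList_eq n 0
    rw [show ((0 : Int) + (n : Int)) = (n : Int) by omega, hm0] at h
    exact h
  have hinj : ∀ l1 l2 : List Char, (String.ofList l1 == String.ofList l2) = true ↔ l1 = l2 := by
    intro l1 l2
    rw [beq_iff_eq]
    constructor
    · intro h
      have h2 := congrArg String.toList h
      simpa using h2
    · intro h; rw [h]
  rw [hm0, hlen, he ((curr.toList.length + 1) / 2)]
  by_cases hcond : everyOther curr.toList = expList true ((curr.toList.length + 1) / 2)
  · rw [if_pos hcond, if_pos ((hinj _ _).mpr hcond)]
  · rw [if_neg hcond, if_neg (fun h => hcond ((hinj _ _).mp h))]
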